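-- pv_equiv track=rewrite | github.com/hololee/algorithm | baekjoon/210504/2143.py | cal_sum_list
-- ===== SOURCE A (Python) =====
-- def cal_sum_list(array, size):
--     array_sum_list = list()
--
--     for s_size in range(1, size + 1):
--         temp_sum = sum(array[0:s_size])
--         array_sum_list.append(temp_sum)
--         for s_crd in range(s_size, size):
--             temp_sum += array[s_crd]
--             temp_sum -= array[s_crd - s_size]
--             array_sum_list.append(temp_sum)
--
--     return sorted(array_sum_list), set(array_sum_list)
-- ===== SOURCE B (Python) =====
-- def cal_sum_list(array, size):
--     prefix = [0]
--     for x in array[:size]: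
--         prefix.append(prefix[-1] + x)
--     sums = [prefix[i + length] - prefix[i]
--             for length in range(1, size + 1)
--             for i in range(size - length + 1)]
--     return sorted(sums), set(sums)
-- ===== Notes on version B (the rewrite author's own statement) =====
-- stated objective: alternative
-- what changed: B precomputes a prefix-sum table once and reads every window sum as a difference of two prefix entries in a comprehension, instead of A's per-length incremental sliding sum with add/subtract state.
-- outside the precondition, e.g. on cal_sum_list([], 1): A returns ([0], {0}), B raises IndexError
import Mathlib
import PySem

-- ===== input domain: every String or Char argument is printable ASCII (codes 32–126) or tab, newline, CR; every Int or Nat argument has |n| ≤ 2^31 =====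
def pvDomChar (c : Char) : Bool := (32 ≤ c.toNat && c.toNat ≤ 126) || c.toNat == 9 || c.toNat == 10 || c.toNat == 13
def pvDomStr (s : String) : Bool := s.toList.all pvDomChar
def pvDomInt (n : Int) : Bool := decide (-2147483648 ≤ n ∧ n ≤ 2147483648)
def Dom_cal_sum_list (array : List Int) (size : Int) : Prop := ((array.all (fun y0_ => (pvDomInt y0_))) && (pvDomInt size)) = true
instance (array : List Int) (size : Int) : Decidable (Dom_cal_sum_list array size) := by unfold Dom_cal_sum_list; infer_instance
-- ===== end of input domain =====

-- B replaces A's incremental sliding-window sums by a pref-sum table read twice per window (alternative decomposition, same asymptotic cost).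

-- ===== PORT A =====
-- literal transliteration of A: outer loop over window lengths, inner sliding loop
-- carrying (list-so-far, running sum); array[k] is pyGetD (in range under Pre_).
def cal_sum_list (array : List Int) (size : Int) : List Int × List Int :=
  let l :=
    (PySem.List.pyRange 1 (size + 1) 1).foldl
      (fun acc s_size =>
        let temp_sum := (PySem.List.slice array (some 0) (some s_size)).sum
        ((PySem.List.pyRange s_size size 1).foldl
          (fun (p : List Int × Int) s_crd =>
            let t := p.2 + PySem.List.pyGetD array s_crd 0
                        - PySem.List.pyGetD array (s_crd - s_size) 0
            (p.1 ++ [t], t))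
          (acc ++ [temp_sum], temp_sum)).1)
      []
  (PySem.List.sorted l (fun x => x) false, PySem.Set.ofList l)

-- ===== PORT B =====
-- literal transliteration of B: build pref table (pref[-1] lookup = pyGetD _ (-1)),
-- then a comprehension over (length, i) reading two pref entries.
def cal_sum_list_alt (array : List Int) (size : Int) : List Int × List Int :=
  let pref :=
    (PySem.List.slice array none (some size)).foldl
      (fun p x => p ++ [PySem.List.pyGetD p (-1) 0 + x]) [0]
  let sums :=
    ((PySem.List.pyRange 1 (size + 1) 1).map
      (fun length =>
        (PySem.List.pyRange 0 (size - length + 1) 1).map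
          (fun i => PySem.List.pyGetD pref (i + length) 0
                  - PySem.List.pyGetD pref i 0))).flatten
  (PySem.List.sorted sums (fun x => x) false, PySem.Set.ofList sums)

-- ===== PRECONDITION & SPEC =====
-- Pre_ excludes size > len(array): there A raises IndexError on array[s_crd] in its
-- sliding loop — except the degenerate ([], 1)-shaped corner where A returns ([0], {0})
-- from an empty-slice sum while B's pref-table read raises IndexError itself.
def Pre_cal_sum_list (array : List Int) (size : Int) : Prop := size ≤ (array.length : Int)
instance (array : List Int) (size : Int) : Decidable (Pre_cal_sum_list array size) := by
  unfold Pre_cal_sum_list; infer_instance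
def pvWitness_cal_sum_list : List Int × Int := ([1, -2, 3], 3)
def Spec_cal_sum_list (array : List Int) (size : Int) (out : List Int × List Int) : Prop := out = cal_sum_list_alt array size
instance (array : List Int) (size : Int) (out : List Int × List Int) : Decidable (Spec_cal_sum_list array size out) := by unfold Spec_cal_sum_list; infer_instance

-- ===== CLAIM (what is proved, stated in full; the proofs are below) =====
def Claim_equal_cal_sum_list : Prop := ∀ (array : List Int) (size : Int), Dom_cal_sum_list array size → Pre_cal_sum_list array size → Spec_cal_sum_list array size (cal_sum_list array size)


-- ===== LEMMAS AND PROOFS =====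

-- prefix sum of the first i elements (Int index, clamped like List.take)
def pfxI (array : List Int) (i : Int) : Int := (array.take i.toNat).sum

lemma pfxI_zero (array : List Int) : pfxI array 0 = 0 := by simp [pfxI]

lemma pfxI_succ (array : List Int) (c : Int) (h0 : 0 ≤ c) (h1 : c < (array.length : Int)) :
    pfxI array (c + 1) = pfxI array c + PySem.List.pyGetD array c 0 := by
  rw [PySem.List.pyGetD_eq_getElem array 0 h0 h1]
  unfold pfxI
  have ht : (c + 1).toNat = c.toNat + 1 := by omega
  rw [ht, List.take_add_one, List.sum_append,
    List.getElem?_eq_getElem (by omega : c.toNat < array.length)]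
  simp

-- A's inner sliding loop appends the window sums as prefix differences
lemma inner_eq (array : List Int) (size L : Int) (hL : 1 ≤ L)
    (hsz : size ≤ (array.length : Int)) :
    ∀ (n : Nat) (c : Int), (size - c).toNat = n → L ≤ c →
    ∀ (acc : List Int),
    ((PySem.List.pyRange c size).foldl
      (fun (p : List Int × Int) s_crd =>
        let t := p.2 + PySem.List.pyGetD array s_crd 0
                    - PySem.List.pyGetD array (s_crd - L) 0
        (p.1 ++ [t], t))
      (acc, pfxI array c - pfxI array (c - L))).1
    = acc ++ (PySem.List.pyRange c size).map
        (fun j => pfxI array (j + 1) - pfxI array (j + 1 - L)) := by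
  intro n
  induction n with
  | zero =>
    intro c hn hc acc
    rw [PySem.List.pyRange_one_eq_nil (by omega)]
    simp
  | succ n ih =>
    intro c hn hc acc
    have hcs : c < size := by omega
    rw [PySem.List.pyRange_one_cons hcs]
    have h0c : (0:Int) ≤ c := by omega
    have hclen : c < (array.length : Int) := by omega
    have e1 : PySem.List.pyGetD array c 0 = pfxI array (c + 1) - pfxI array c := by
      rw [pfxI_succ array c h0c hclen]; ring
    have e2 : PySem.List.pyGetD array (c - L) 0
        = pfxI array (c - L + 1) - pfxI array (c - L) := by
      rw [pfxI_succ array (c - L) (by omega) (by omega)]; ring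
    simp only [List.foldl_cons, List.map_cons]
    have et : pfxI array c - pfxI array (c - L) + PySem.List.pyGetD array c 0
        - PySem.List.pyGetD array (c - L) 0
        = pfxI array (c + 1) - pfxI array (c + 1 - L) := by
      rw [e1, e2]; ring_nf
    show ((PySem.List.pyRange (c+1) size).foldl _ (acc ++ [_], _)).1 = _
    rw [et]
    have e3 : pfxI array (c + 1) - pfxI array (c + 1 - L)
        = pfxI array (c + 1) - pfxI array ((c + 1) - L) := rfl
    rw [e3, ih (c + 1) (by omega) (by omega) (acc ++ [pfxI array (c + 1) - pfxI array (c + 1 - L)])]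
    simp

-- one iteration of A's outer loop appends one whole block
lemma outer_block (array : List Int) (size L : Int) (hL : 1 ≤ L) (_hLs : L ≤ size)
    (hsz : size ≤ (array.length : Int)) (acc : List Int) :
    (let temp_sum := (PySem.List.slice array (some 0) (some L)).sum
     ((PySem.List.pyRange L size).foldl
       (fun (p : List Int × Int) s_crd =>
         let t := p.2 + PySem.List.pyGetD array s_crd 0
                     - PySem.List.pyGetD array (s_crd - L) 0
         (p.1 ++ [t], t))
       (acc ++ [temp_sum], temp_sum)).1)
    = acc ++ (pfxI array L
        :: (PySem.List.pyRange L size).map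
             (fun j => pfxI array (j + 1) - pfxI array (j + 1 - L))) := by
  have hts : (PySem.List.slice array (some 0) (some L)).sum = pfxI array L := by
    rw [PySem.List.slice_zero_start, PySem.List.slice_to array (by omega : (0:Int) ≤ L)]
    rfl
  simp only [hts]
  have hinit : pfxI array L = pfxI array L - pfxI array (L - L) := by
    have : L - L = (0:Int) := by ring
    rw [this, pfxI_zero]; ring
  conv_lhs => rw [hinit]
  rw [inner_eq array size L hL hsz (size - L).toNat L rfl le_rfl
      (acc ++ [pfxI array L - pfxI array (L - L)])]
  rw [← hinit]
  simp

-- Nat-indexed prefix sum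
def pfxN (array : List Int) (k : Nat) : Int := (array.take k).sum

lemma pfxI_eq_pfxN (array : List Int) (j : Int) : pfxI array j = pfxN array j.toNat := rfl

-- B's prefix-building fold produces the running partial sums of ys after acc
lemma pref_foldl (ys : List Int) :
    ∀ (acc : List Int) (h : acc ≠ []),
    ys.foldl (fun p x => p ++ [PySem.List.pyGetD p (-1) 0 + x]) acc
    = acc ++ (List.range ys.length).map (fun k => acc.getLast h + (ys.take (k + 1)).sum) := by
  induction ys with
  | nil => intro acc h; simp
  | cons y ys ih =>
    intro acc h
    simp only [List.foldl_cons]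
    rw [PySem.List.pyGetD_neg_one acc 0 h]
    rw [ih (acc ++ [acc.getLast h + y]) (by simp)]
    have hlast : (acc ++ [acc.getLast h + y]).getLast (by simp) = acc.getLast h + y :=
      List.getLast_concat
    rw [hlast]
    simp only [List.length_cons, List.range_succ_eq_map, List.map_cons, List.map_map]
    simp only [List.take_succ_cons, List.sum_cons]
    rw [List.append_assoc]
    congr 1
    simp only [List.cons_append, List.nil_append]
    congr 1
    · simp
    · apply List.map_congr_left
      intro k _
      simp [Function.comp]
      ring

-- characterization of B's prefix table
lemma pref_eq (array : List Int) (size : Int) (h0 : 0 ≤ size)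
    (hsz : size ≤ (array.length : Int)) :
    (PySem.List.slice array none (some size)).foldl
      (fun p x => p ++ [PySem.List.pyGetD p (-1) 0 + x]) [0]
    = (List.range (size.toNat + 1)).map (pfxN array) := by
  rw [PySem.List.slice_to array h0]
  rw [pref_foldl (array.take size.toNat) [0] (by simp)]
  have hlen : (array.take size.toNat).length = size.toNat := by
    rw [List.length_take]; omega
  rw [hlen]
  rw [List.range_succ_eq_map, List.map_cons, List.map_map]
  have hhead : pfxN array 0 = 0 := by simp [pfxN]
  rw [hhead]
  simp only [List.getLast_singleton, List.singleton_append]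
  congr 1
  apply List.map_congr_left
  intro k hk
  rw [List.mem_range] at hk
  have htt : (array.take size.toNat).take (k + 1) = array.take (k + 1) := by
    rw [List.take_take]; congr 1; omega
  simp [Function.comp, htt, pfxN]

-- reading B's prefix table is pfxI
lemma pref_get (array : List Int) (size : Int) (h0 : 0 ≤ size)
    (hsz : size ≤ (array.length : Int)) (j : Int) (hj0 : 0 ≤ j) (hj : j ≤ size) :
    PySem.List.pyGetD
      ((PySem.List.slice array none (some size)).foldl
        (fun p x => p ++ [PySem.List.pyGetD p (-1) 0 + x]) [0]) j 0
    = pfxI array j := by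
  rw [pref_eq array size h0 hsz]
  have hlen : ((List.range (size.toNat + 1)).map (pfxN array)).length
      = size.toNat + 1 := by simp
  rw [PySem.List.pyGetD_eq_getElem _ 0 hj0 (by rw [hlen]; omega)]
  rw [List.getElem_map, List.getElem_range]
  exact (pfxI_eq_pfxN array j).symm

-- ===== VERDICT (by name: the statement is the Claim_ definition above) =====
theorem cal_sum_list_spec : Claim_equal_cal_sum_list := by
  intro array size _ hpre
  unfold Pre_cal_sum_list at hpre
  unfold Spec_cal_sum_list
  by_cases hle : size ≤ 0
  · simp [cal_sum_list, cal_sum_list_alt,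
      PySem.List.pyRange_one_eq_nil (by omega : size + 1 ≤ 1)]
  · have hpos : 0 < size := by omega
    have h0 : (0:Int) ≤ size := by omega
    simp only [cal_sum_list, cal_sum_list_alt]
    have hmain :
        (PySem.List.pyRange 1 (size + 1)).foldl
          (fun acc s_size =>
            let temp_sum := (PySem.List.slice array (some 0) (some s_size)).sum
            ((PySem.List.pyRange s_size size).foldl
              (fun (p : List Int × Int) s_crd =>
                let t := p.2 + PySem.List.pyGetD array s_crd 0
                            - PySem.List.pyGetD array (s_crd - s_size) 0
                (p.1 ++ [t], t))
              (acc ++ [temp_sum], temp_sum)).1)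
          []
        = ((PySem.List.pyRange 1 (size + 1)).map
            (fun length =>
              (PySem.List.pyRange 0 (size - length + 1)).map
                (fun i =>
                  PySem.List.pyGetD
                    ((PySem.List.slice array none (some size)).foldl
                      (fun p x => p ++ [PySem.List.pyGetD p (-1) 0 + x]) [0]) (i + length) 0
                  - PySem.List.pyGetD
                    ((PySem.List.slice array none (some size)).foldl
                      (fun p x => p ++ [PySem.List.pyGetD p (-1) 0 + x]) [0]) i 0))).flatten := by
      rw [PySem.List.foldl_congr_mem (PySem.List.pyRange 1 (size + 1)) _
        (fun acc L => acc ++ (pfxI array L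
          :: (PySem.List.pyRange L size).map
               (fun j => pfxI array (j + 1) - pfxI array (j + 1 - L)))) []
        (by
          intro acc L hL
          rw [PySem.List.mem_pyRange_one] at hL
          exact outer_block array size L (by omega) (by omega) hpre acc)]
      rw [PySem.List.foldl_append_eq_flatMap]
      rw [List.nil_append, ← List.flatMap_def]
      have hBblock : ∀ L : Int, 1 ≤ L → L < size + 1 →
          (PySem.List.pyRange 0 (size - L + 1)).map
            (fun i =>
              PySem.List.pyGetD
                ((PySem.List.slice array none (some size)).foldl
                  (fun p x => p ++ [PySem.List.pyGetD p (-1) 0 + x]) [0]) (i + L) 0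
              - PySem.List.pyGetD
                ((PySem.List.slice array none (some size)).foldl
                  (fun p x => p ++ [PySem.List.pyGetD p (-1) 0 + x]) [0]) i 0)
          = (PySem.List.pyRange 0 (size - L + 1)).map
              (fun i => pfxI array (i + L) - pfxI array i) := by
        intro L h1 h2
        apply List.map_congr_left
        intro i hi
        rw [PySem.List.mem_pyRange_one] at hi
        rw [pref_get array size h0 hpre (i + L) (by omega) (by omega),
            pref_get array size h0 hpre i (by omega) (by omega)]
      apply List.flatMap_congr
      intro L hL
      rw [PySem.List.mem_pyRange_one] at hL
      rw [hBblock L hL.1 hL.2]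
      -- split off i = 0
      rw [PySem.List.pyRange_one_cons (by omega : (0:Int) < size - L + 1)]
      rw [List.map_cons]
      congr 1
      · rw [pfxI_zero]; ring_nf
      · rw [PySem.List.pyRange_one, PySem.List.pyRange_one, List.map_map, List.map_map]
        have hn : (size - L + 1 - (0 + 1)).toNat = (size - L).toNat := by omega
        rw [hn]
        apply List.map_congr_left
        intro k _
        simp only [Function.comp]
        have a1 : (0:Int) + 1 + (k:Int) + L = L + (k:Int) + 1 := by ring
        have a2 : L + (k:Int) + 1 - L = 0 + 1 + (k:Int) := by ring
        rw [a1, a2]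
    rw [hmain]
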